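-- pv_equiv track=rewrite | github.com/Rendo-M/Examples | python/3_homework.py | get_full_fib
-- ===== SOURCE A (Python) =====
-- def get_full_fib(items):
--     fib =[0]
--     if items > 0:
--         fib.append(1)
--     for i in range(2, items+1):
--         fib.append(fib[i-1]+fib[i-2])
--     fib = [(-1)**(i+1)*fib[i] for i in range(len(fib)-1, 0, -1)]+fib
--     return fib
-- ===== SOURCE B (Python) =====
-- def get_full_fib(items):
--     if items <= 0:
--         return [0]
--     fib = [0, 1]
--     for _ in range(2, items + 1):
--         fib.append(fib[-1] + fib[-2])
--     # negative side via the backward recurrence F(n-2) = F(n) - F(n-1)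
--     neg = []
--     a, b = 1, 0  # F(1), F(0)
--     for _ in range(items):
--         a, b = b, a - b
--         neg.append(b)
--     neg.reverse()
--     return neg + fib
-- ===== Notes on version B (the rewrite author's own statement) =====
-- stated objective: alternative
-- what changed: The negative-index half is computed by iterating the backward recurrence F(n-2)=F(n)-F(n-1) from (F1,F0) and reversing, instead of A's list comprehension with the (-1)**(i+1) reflection and indexed lookups; the nonpositive-count degenerate case is returned directly.
import Mathlib
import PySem

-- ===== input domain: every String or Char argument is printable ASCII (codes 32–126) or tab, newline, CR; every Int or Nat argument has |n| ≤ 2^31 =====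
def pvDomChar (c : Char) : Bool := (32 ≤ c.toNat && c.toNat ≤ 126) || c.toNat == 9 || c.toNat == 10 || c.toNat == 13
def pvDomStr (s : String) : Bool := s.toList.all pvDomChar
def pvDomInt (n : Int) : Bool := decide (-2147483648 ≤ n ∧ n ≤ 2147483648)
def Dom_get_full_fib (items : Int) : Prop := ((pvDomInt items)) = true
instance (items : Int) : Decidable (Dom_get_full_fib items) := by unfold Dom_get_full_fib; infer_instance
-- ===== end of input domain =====

-- B computes the negative-index terms by the backward recurrence F(n-2)=F(n)-F(n-1) instead of A's (-1)**(i+1) reflection; same values, alternative algorithm.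

-- ===== PORT A =====
-- In A, the comprehension's exponent i+1 is always ≥ 2 (i ranges down to 1), so `(i+1).toNat` is exact.
def get_full_fib (items : Int) : List Int :=
  let fib : List Int := [0]
  let fib := if items > 0 then fib ++ [1] else fib
  let fib := (PySem.List.pyRange 2 (items + 1) 1).foldl
    (fun f i => f ++ [PySem.List.pyGetD f (i - 1) 0 + PySem.List.pyGetD f (i - 2) 0]) fib
  ((PySem.List.pyRange ((fib.length : Int) - 1) 0 (-1)).map
    (fun i => (-1 : Int) ^ (i + 1).toNat * PySem.List.pyGetD fib i 0)) ++ fib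

-- ===== PORT B =====
def get_full_fib_alt (items : Int) : List Int :=
  if items ≤ 0 then [0]
  else
    let fib := (PySem.List.pyRange 2 (items + 1) 1).foldl
      (fun f _ => f ++ [PySem.List.pyGetD f (-1) 0 + PySem.List.pyGetD f (-2) 0]) [0, 1]
    let st := (PySem.List.pyRange 0 items 1).foldl
      (fun (st : List Int × Int × Int) _ =>
        (st.1 ++ [st.2.1 - st.2.2], st.2.2, st.2.1 - st.2.2)) ([], 1, 0)
    st.1.reverse ++ fib

-- ===== PRECONDITION & SPEC =====
def Spec_get_full_fib (items : Int) (out : List Int) : Prop := out = get_full_fib_alt items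
instance (items : Int) (out : List Int) : Decidable (Spec_get_full_fib items out) := by unfold Spec_get_full_fib; infer_instance

-- ===== CLAIM (what is proved, stated in full; the proofs are below) =====
def Claim_equal_get_full_fib : Prop := ∀ (items : Int), Dom_get_full_fib items → Spec_get_full_fib items (get_full_fib items)

-- ===== LEMMAS AND PROOFS =====

def pvFib : Nat → Int
  | 0 => 0
  | 1 => 1
  | n + 2 => pvFib n + pvFib (n + 1)

/-- the two-sided value at index -j, i.e. F(-j) = (-1)^(j+1) F(j) -/
def pvS (j : Nat) : Int := (-1 : Int) ^ (j + 1) * pvFib j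

/-- value of B's variable `a` after k backward steps -/
def pvA : Nat → Int
  | 0 => 1
  | k + 1 => pvS k

lemma pvA_sub_pvS (n : Nat) : pvA n - pvS n = pvS (n + 1) := by
  cases n with
  | zero => simp [pvA, pvS, pvFib]
  | succ k =>
    show pvS k - pvS (k + 1) = pvS (k + 2)
    simp only [pvS, pvFib, pow_succ]
    ring

lemma fib_loop_A (n : Nat) :
    (PySem.List.pyRange 2 ((n : Int) + 1 + 1) 1).foldl
      (fun f i => f ++ [PySem.List.pyGetD f (i - 1) 0 + PySem.List.pyGetD f (i - 2) 0]) [0, 1]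
    = (List.range (n + 2)).map pvFib := by
  induction n with
  | zero => simp [PySem.List.pyRange_one_eq_nil, List.range_succ, pvFib]
  | succ n ih =>
    rw [show ((n + 1 : Nat) : Int) + 1 + 1 = ((n : Int) + 1 + 1) + 1 by push_cast; ring,
        PySem.List.pyRange_one_succ_right (by omega), List.foldl_append, ih]
    have h1 : ((n : Int) + 1 + 1 - 1) = ((n + 1 : Nat) : Int) := by push_cast; ring
    have h2 : ((n : Int) + 1 + 1 - 2) = ((n : Nat) : Int) := by ring
    simp only [List.foldl_cons, List.foldl_nil, h1, h2, PySem.List.pyGetD_natCast]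
    rw [List.getD_eq_getElem _ _ (by simp), List.getD_eq_getElem _ _ (by simp)]
    simp [List.range_succ, pvFib, add_comm]

lemma fib_loop_B (n : Nat) :
    (PySem.List.pyRange 2 ((n : Int) + 1 + 1) 1).foldl
      (fun f _ => f ++ [PySem.List.pyGetD f (-1) 0 + PySem.List.pyGetD f (-2) 0]) [0, 1]
    = (List.range (n + 2)).map pvFib := by
  induction n with
  | zero => simp [PySem.List.pyRange_one_eq_nil, List.range_succ, pvFib]
  | succ n ih =>
    rw [show ((n + 1 : Nat) : Int) + 1 + 1 = ((n : Int) + 1 + 1) + 1 by push_cast; ring,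
        PySem.List.pyRange_one_succ_right (by omega), List.foldl_append, ih]
    have hlen : ((List.range (n + 2)).map pvFib).length = n + 2 := by simp
    rw [List.foldl_cons, List.foldl_nil,
        PySem.List.pyGetD_neg_ofNat _ 1 0 (by omega) (by omega),
        PySem.List.pyGetD_neg_ofNat _ 2 0 (by omega) (by omega)]
    simp [List.range_succ, pvFib, add_comm]

lemma neg_loop_B (n : Nat) :
    (PySem.List.pyRange 0 (n : Int) 1).foldl
      (fun (st : List Int × Int × Int) _ =>
        (st.1 ++ [st.2.1 - st.2.2], st.2.2, st.2.1 - st.2.2)) ([], 1, 0)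
    = ((List.range n).map (fun j => pvS (j + 1)), pvA n, pvS n) := by
  induction n with
  | zero => simp [PySem.List.pyRange_one_eq_nil, pvA, pvS, pvFib]
  | succ n ih =>
    rw [show ((n + 1 : Nat) : Int) = (n : Int) + 1 by push_cast; ring,
        PySem.List.pyRange_one_succ_right (by omega), List.foldl_append, ih]
    simp only [List.foldl_cons, List.foldl_nil]
    rw [pvA_sub_pvS]
    simp [List.range_succ, pvA]

theorem main (items : Int) : get_full_fib items = get_full_fib_alt items := by
  by_cases h : items ≤ 0
  · -- degenerate case: both return [0]
    unfold get_full_fib get_full_fib_alt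
    simp only [gt_iff_lt]
    rw [if_pos h, if_neg (show ¬ (0 : Int) < items by omega),
        PySem.List.pyRange_one_eq_nil (show items + 1 ≤ 2 by omega)]
    simp [PySem.List.pyRange_neg_one_eq_nil]
  · -- items ≥ 1: items = ↑(n+1)
    obtain ⟨n, hn⟩ : ∃ n : Nat, items = (n : Int) + 1 :=
      ⟨(items - 1).toNat, by omega⟩
    subst hn
    unfold get_full_fib get_full_fib_alt
    simp only [gt_iff_lt]
    rw [if_neg h, if_pos (show (0 : Int) < (n : Int) + 1 by omega)]
    simp only [List.singleton_append]
    rw [fib_loop_A n, fib_loop_B n,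
        show ((n : Int) + 1) = ((n + 1 : Nat) : Int) by push_cast; ring, neg_loop_B (n + 1)]
    simp only [List.length_map, List.length_range]
    have hcast : ((n + 2 : Nat) : Int) - 1 = (n : Int) + 1 := by push_cast; ring
    rw [hcast, PySem.List.pyRange_neg_one_eq_reverse, List.map_reverse]
    congr 2
    rw [show (0 : Int) + 1 = (1 : Int) by ring, PySem.List.pyRange_one]
    rw [show ((n : Int) + 1 + 1 - 1).toNat = n + 1 by omega, List.map_map]
    apply List.map_congr_left
    intro k hk
    rw [List.mem_range] at hk
    simp only [Function.comp_apply]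
    rw [show (1 : Int) + (k : Int) = ((k + 1 : Nat) : Int) by push_cast; ring,
        PySem.List.pyGetD_natCast,
        List.getD_eq_getElem _ _ (by simp; omega)]
    simp only [List.getElem_map, List.getElem_range]
    rw [show (((k + 1 : Nat) : Int) + 1).toNat = k + 2 by omega]
    simp [pvS, pow_succ]

-- ===== VERDICT (by name: the statement is the Claim_ definition above) =====
theorem get_full_fib_spec : Claim_equal_get_full_fib := by
  intro items _
  exact main items
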